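-- pv_equiv track=rewrite | github.com/Vanshgupta3/bias-ai-convo-project | bias_detector.py | compute_severity
-- ===== SOURCE A (Python) =====
-- INTENSITY_WORDS = ["always", "never", "everyone", "nobody", "must", "completely"]
--
-- def compute_severity(text):
--     score = 0
--     words = text.lower().split()
--
--     for w in words:
--         if w in INTENSITY_WORDS:
--             score += 15
--
--     if len(text.split()) > 12:
--         score += 10
--
--     return min(100, max(30, score))
-- ===== SOURCE B (Python) =====
-- INTENSITY_WORDS = ["always", "never", "everyone", "nobody", "must", "completely"]
--
-- def compute_severity(text):
--     words = text.lower().split()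
--     counts = {}
--     for w in words:
--         counts[w] = counts.get(w, 0) + 1
--     score = 15 * sum(counts.get(k, 0) for k in INTENSITY_WORDS)
--     if len(words) > 12:
--         score += 10
--     return min(100, max(30, score))
-- ===== Notes on version B (the rewrite author's own statement) =====
-- stated objective: alternative
-- what changed: B builds a word-frequency dict in one pass and then sums the counts of the six fixed intensity keywords, instead of testing each word for membership in the keyword list; the word-count test reuses the already-split word list instead of splitting the text a second time.
import Mathlib
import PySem

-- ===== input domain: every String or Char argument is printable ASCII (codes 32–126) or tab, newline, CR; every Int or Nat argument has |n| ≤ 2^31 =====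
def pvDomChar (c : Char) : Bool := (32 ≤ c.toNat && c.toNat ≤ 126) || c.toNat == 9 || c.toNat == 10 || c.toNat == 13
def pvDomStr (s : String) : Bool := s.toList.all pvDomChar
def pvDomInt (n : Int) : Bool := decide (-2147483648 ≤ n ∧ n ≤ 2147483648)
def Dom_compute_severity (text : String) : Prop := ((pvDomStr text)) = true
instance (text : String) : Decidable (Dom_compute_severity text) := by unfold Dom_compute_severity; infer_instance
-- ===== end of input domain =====

-- B counts word frequencies in a dict once, then sums the counts of the six fixed keywords (alternative decomposition; same return value).


def INTENSITY_WORDS : List String := ["always", "never", "everyone", "nobody", "must", "completely"]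

-- ===== PORT A =====
def compute_severity (text : String) : Int :=
  let words := PySem.Str.split₀ (PySem.Str.lower text)
  let score : Int := words.foldl (fun acc w => if INTENSITY_WORDS.contains w then acc + 15 else acc) 0
  let score := if (PySem.Str.split₀ text).length > 12 then score + 10 else score
  min 100 (max 30 score)

-- ===== PORT B =====
def compute_severity_alt (text : String) : Int :=
  let words := PySem.Str.split₀ (PySem.Str.lower text)
  let counts : PySem.Dict String Int :=
    words.foldl (fun d w => d.insert w (d.getD w 0 + 1)) PySem.Dict.empty
  let score : Int := 15 * (INTENSITY_WORDS.map (fun k => counts.getD k 0)).sum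
  let score := if words.length > 12 then score + 10 else score
  min 100 (max 30 score)

-- ===== PRECONDITION & SPEC =====
def Spec_compute_severity (text : String) (out : Int) : Prop := out = compute_severity_alt text
instance (text : String) (out : Int) : Decidable (Spec_compute_severity text out) := by unfold Spec_compute_severity; infer_instance

-- ===== CLAIM (what is proved, stated in full; the proofs are below) =====
def Claim_equal_compute_severity : Prop := ∀ (text : String), Dom_compute_severity text → Spec_compute_severity text (compute_severity text)

-- ===== LEMMAS AND PROOFS =====

-- lowercasing a character never changes whether it is whitespace
theorem pv_isspace_lowerChar (c : Char) :
    PySem.Chars.isspace (PySem.Chars.lowerChar c) = PySem.Chars.isspace c := by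
  unfold PySem.Chars.lowerChar
  split_ifs with h
  · have h1 : 'A' ≤ c ∧ c ≤ 'Z' := by
      unfold PySem.Chars.isupper at h
      simpa using h
    have hlo : (65 : Nat) ≤ c.toNat := h1.1
    have hhi : c.toNat ≤ 90 := h1.2
    have hv : (Char.ofNat (c.toNat + 32)).toNat = c.toNat + 32 := by
      have : Nat.isValidChar (c.toNat + 32) := Or.inl (by omega)
      simp [Char.ofNat, this]
    have hB : PySem.Chars.isspace (Char.ofNat (c.toNat + 32)) = false := by
      simp only [PySem.Chars.isspace, hv]
      simp only [Bool.or_eq_false_iff, Bool.and_eq_false_iff, decide_eq_false_iff_not]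
      omega
    have hA : PySem.Chars.isspace c = false := by
      simp only [PySem.Chars.isspace]
      simp only [Bool.or_eq_false_iff, Bool.and_eq_false_iff, decide_eq_false_iff_not]
      omega
    rw [hB, hA]
  · rfl

-- split₀.go commutes with per-character lowercasing
theorem pv_go_map (s cur : List Char) (acc : List (List Char)) :
    PySem.Chars.split₀.go (s.map PySem.Chars.lowerChar) (cur.map PySem.Chars.lowerChar)
        (acc.map (List.map PySem.Chars.lowerChar))
      = (PySem.Chars.split₀.go s cur acc).map (List.map PySem.Chars.lowerChar) := by
  induction s generalizing cur acc with
  | nil =>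
    by_cases h : cur.isEmpty = true <;>
      simp [PySem.Chars.split₀.go, h, List.map_reverse]
  | cons c rest ih =>
    by_cases hs : PySem.Chars.isspace c = true
    · by_cases h : cur.isEmpty = true
      · have hc : cur = [] := by simpa using h
        subst hc
        simpa [PySem.Chars.split₀.go, pv_isspace_lowerChar, hs] using ih [] acc
      · have := ih [] (cur.reverse :: acc)
        simpa [PySem.Chars.split₀.go, pv_isspace_lowerChar, hs, h, List.map_reverse] using this
    · simpa [PySem.Chars.split₀.go, pv_isspace_lowerChar, hs] using ih (c :: cur) acc

theorem pv_split₀_lower (l : List Char) :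
    PySem.Chars.split₀ (PySem.Chars.lower l)
      = (PySem.Chars.split₀ l).map PySem.Chars.lower := by
  have := pv_go_map l [] []
  simpa [PySem.Chars.split₀, PySem.Chars.lower] using this

theorem pv_len_split_lower (s : String) :
    (PySem.Str.split₀ (PySem.Str.lower s)).length = (PySem.Str.split₀ s).length := by
  have h1 := congrArg List.length (PySem.Str.split₀_map_toList (PySem.Str.lower s))
  have h2 := congrArg List.length (PySem.Str.split₀_map_toList s)
  simp only [List.length_map] at h1 h2
  rw [h1, PySem.Str.toList_lower, pv_split₀_lower, List.length_map, ← h2]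

-- A's accumulation loop is 15 times the number of keyword occurrences
theorem pv_foldl15 (kw l : List String) (a : Int) :
    l.foldl (fun acc w => if kw.contains w then acc + 15 else acc) a
      = a + 15 * (l.countP (fun w => kw.contains w) : Int) := by
  induction l generalizing a with
  | nil => simp
  | cons x l ih =>
    rw [List.foldl_cons, List.countP_cons]
    by_cases h : kw.contains x = true
    · have hm : x ∈ kw := by simpa using h
      rw [if_pos h, ih]
      simp [hm]
      omega
    · have hm : x ∉ kw := by simpa using h
      rw [if_neg h, ih]
      simp [hm]

theorem pv_countP_or (x : String) (q : String → Bool) (hq : q x = false) (l : List String) :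
    l.countP (fun w => w == x || q w) = l.count x + l.countP q := by
  induction l with
  | nil => simp
  | cons a l ih =>
    by_cases h : a = x
    · subst h
      simp [hq, ih]
      omega
    · have hne : (a == x) = false := by simpa using h
      by_cases hqa : q a = true
      · simp [List.count_cons, hne, hqa, ih]
        omega
      · simp [List.count_cons, hne, hqa, ih]

-- summing per-keyword counts over a duplicate-free keyword list = counting keyword occurrences
theorem pv_sum_counts (K : List String) (h : K.Nodup) (l : List String) :
    (K.map (fun k => (l.count k : Int))).sum = (l.countP (fun w => K.contains w) : Int) := by
  induction K with
  | nil => simp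
  | cons x K ih =>
    have hx : x ∉ K := (List.nodup_cons.mp h).1
    have hK : K.Nodup := (List.nodup_cons.mp h).2
    have hq : K.contains x = false := by simpa using hx
    have hcont : (fun w => (x :: K).contains w) = (fun w => w == x || K.contains w) := by
      funext w
      simp [beq_eq_decide, eq_comm]
    rw [hcont, pv_countP_or x K.contains hq l]
    rw [List.map_cons, List.sum_cons, ih hK]
    push_cast
    ring

-- ===== VERDICT (by name: the statement is the Claim_ definition above) =====
theorem compute_severity_spec : Claim_equal_compute_severity := by
  intro text _
  unfold Spec_compute_severity compute_severity compute_severity_alt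
  have hget : ∀ k : String,
      ((PySem.Str.split₀ (PySem.Str.lower text)).foldl
          (fun d w => d.insert w (d.getD w 0 + 1)) PySem.Dict.empty).getD k 0
        = ((PySem.Str.split₀ (PySem.Str.lower text)).count k : Int) := by
    intro k
    rw [PySem.Dict.getD_foldl_insert_add_one]
    simp
  have hnd : INTENSITY_WORDS.Nodup := by decide
  simp only [hget, pv_foldl15, pv_sum_counts INTENSITY_WORDS hnd, pv_len_split_lower, zero_add]
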